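-- pv_equiv track=rewrite | github.com/oliver306/TREE | kResilienceTrees.py | removeFails
-- ===== SOURCE A (Python) =====
-- def removeFails(dfs, fails):
--
--     #fails = [(14,16)]
--     for fail in fails:
--         idx = 0
--         start_idx = -1
--         end_idx = -1
--         search_mode = False
--         failed_edge = (-1,-1)
--         for n1,n2,label in dfs:
--             if ((n1 == fail[0] and n2 == fail[1]) or (n1 == fail[1] and n2 == fail[0])) and label == "forward":
--                 search_mode = True
--                 failed_edge = fail
--                 start_idx = idx
--
--             if search_mode and ((n1 == failed_edge[0] and n2 == failed_edge[1]) or (n1 == failed_edge[1] and n2 == failed_edge[0])) and label == "reverse":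
--                 end_idx = idx
--                 break #new
--
--             idx += 1
--         if start_idx > -1 and end_idx > -1:
--             for i in range(end_idx, start_idx-1, -1):
--                 del dfs[i]
--
--     return dfs
-- ===== SOURCE B (Python) =====
-- def removeFails(dfs, fails):
--     for fail in fails:
--         fwd = [i for i, (n1, n2, lab) in enumerate(dfs)
--                if ((n1, n2) == fail or (n2, n1) == fail) and lab == "forward"]
--         if not fwd:
--             continue
--         rev_after = [i for i, (n1, n2, lab) in enumerate(dfs)
--                      if ((n1, n2) == fail or (n2, n1) == fail) and lab == "reverse"
--                      and i > fwd[0]]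
--         if not rev_after:
--             continue
--         r = rev_after[0]
--         start = max(i for i in fwd if i < r)
--         del dfs[start:r + 1]
--     return dfs
-- ===== Notes on version B (the rewrite author's own statement) =====
-- stated objective: alternative
-- what changed: Replaces A's single stateful scan (idx/start_idx/end_idx/search_mode/failed_edge state machine with break, then an element-by-element descending del loop) by declarative index computations per fail: comprehensions collect the forward and reverse match positions, the cut is [max forward index below the first reverse after the first forward, that reverse], removed with one slice deletion.
import Mathlib
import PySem

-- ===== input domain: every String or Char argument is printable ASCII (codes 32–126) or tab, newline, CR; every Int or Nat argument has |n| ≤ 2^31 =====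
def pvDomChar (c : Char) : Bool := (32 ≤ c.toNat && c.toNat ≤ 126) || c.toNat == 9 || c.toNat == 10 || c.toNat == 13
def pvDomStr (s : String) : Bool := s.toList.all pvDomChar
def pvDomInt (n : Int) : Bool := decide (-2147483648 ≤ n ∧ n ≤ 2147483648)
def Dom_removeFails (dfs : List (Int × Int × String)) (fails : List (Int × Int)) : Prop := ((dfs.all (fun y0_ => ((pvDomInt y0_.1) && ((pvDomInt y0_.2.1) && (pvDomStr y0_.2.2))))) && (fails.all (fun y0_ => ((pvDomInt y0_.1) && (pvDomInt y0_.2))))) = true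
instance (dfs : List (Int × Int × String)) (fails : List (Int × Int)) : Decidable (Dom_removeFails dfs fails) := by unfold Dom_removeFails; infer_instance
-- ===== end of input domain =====

-- B replaces A's stateful scan-with-break by per-fail index comprehensions and one slice
-- deletion (objective: alternative). Both A and B mutate dfs in place in Python and return
-- it; the theorem is about the returned value.


-- ===== PORT A =====
-- A's inner loop: state (idx, start_idx, end_idx, search_mode, failed_edge), break on the
-- reverse hit (returning (start_idx, idx)); falling off the list returns (start_idx, end_idx).
def scanA (fail : Int × Int) : List (Int × Int × String) → Int → Int → Int → Bool → (Int × Int) → Int × Int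
  | [], _, s, e, _, _ => (s, e)
  | (n1, n2, label) :: rest, idx, s, e, sm, fe =>
    let hit := ((n1 == fail.1 && n2 == fail.2) || (n1 == fail.2 && n2 == fail.1)) && label == "forward"
    let s' := if hit then idx else s
    let sm' := if hit then true else sm
    let fe' := if hit then fail else fe
    if sm' && (((n1 == fe'.1 && n2 == fe'.2) || (n1 == fe'.2 && n2 == fe'.1)) && label == "reverse") then
      (s', idx)
    else scanA fail rest (idx + 1) s' e sm' fe'

-- `del dfs[i]` (the index is always valid when A executes it; getD only totalises).
def delA (l : List (Int × Int × String)) (i : Int) : List (Int × Int × String) :=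
  ((PySem.List.pop? l i).map Prod.snd).getD l

def stepA (dfs : List (Int × Int × String)) (fail : Int × Int) : List (Int × Int × String) :=
  let se := scanA fail dfs 0 (-1) (-1) false (-1, -1)
  if se.1 > -1 ∧ se.2 > -1 then
    (PySem.List.pyRange se.2 (se.1 - 1) (-1)).foldl delA dfs
  else dfs

def removeFails (dfs : List (Int × Int × String)) (fails : List (Int × Int)) : List (Int × Int × String) :=
  fails.foldl stepA dfs

-- ===== PORT B =====
-- ((n1, n2) == fail or (n2, n1) == fail)
def edgeMatch (fail : Int × Int) (x : Int × Int × String) : Bool :=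
  (((x.1, x.2.1) : Int × Int) == fail) || (((x.2.1, x.1) : Int × Int) == fail)

def stepB (dfs : List (Int × Int × String)) (fail : Int × Int) : List (Int × Int × String) :=
  let fwd := ((PySem.List.enumerate dfs 0).filter (fun p => edgeMatch fail p.2 && p.2.2.2 == "forward")).map Prod.fst
  match fwd with
  | [] => dfs
  | f0 :: _ =>
    let revAfter := ((PySem.List.enumerate dfs 0).filter
        (fun p => edgeMatch fail p.2 && p.2.2.2 == "reverse" && decide (f0 < p.1))).map Prod.fst
    match revAfter with
    | [] => dfs
    | r :: _ =>
      -- max(i for i in fwd if i < r); the generator is never empty, getD only totalises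
      let start := (PySem.List.max? (fwd.filter (fun i => decide (i < r))) id).getD 0
      -- del dfs[start:r+1]  ≡  dfs[:start] + dfs[r+1:]
      PySem.List.slice dfs none (some start) ++ PySem.List.slice dfs (some (r + 1)) none

def removeFails_alt (dfs : List (Int × Int × String)) (fails : List (Int × Int)) : List (Int × Int × String) :=
  fails.foldl stepB dfs

-- ===== PRECONDITION & SPEC =====
def Spec_removeFails (dfs : List (Int × Int × String)) (fails : List (Int × Int)) (out : List (Int × Int × String)) : Prop := out = removeFails_alt dfs fails
instance (dfs : List (Int × Int × String)) (fails : List (Int × Int)) (out : List (Int × Int × String)) : Decidable (Spec_removeFails dfs fails out) := by unfold Spec_removeFails; infer_instance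

-- ===== CLAIM (what is proved, stated in full; the proofs are below) =====
def Claim_equal_removeFails : Prop := ∀ (dfs : List (Int × Int × String)) (fails : List (Int × Int)), Dom_removeFails dfs fails → Spec_removeFails dfs fails (removeFails dfs fails)

-- ===== LEMMAS AND PROOFS =====

-- abbreviations for B's index lists (definitionally those used in stepB)
def Fi (fail : Int × Int) (l : List (Int × Int × String)) (k : Int) : List Int :=
  ((PySem.List.enumerate l k).filter (fun p => edgeMatch fail p.2 && p.2.2.2 == "forward")).map Prod.fst
def Ri (fail : Int × Int) (l : List (Int × Int × String)) (k : Int) : List Int :=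
  ((PySem.List.enumerate l k).filter (fun p => edgeMatch fail p.2 && p.2.2.2 == "reverse")).map Prod.fst
def Ra (fail : Int × Int) (l : List (Int × Int × String)) (k : Int) (f0 : Int) : List Int :=
  ((PySem.List.enumerate l k).filter (fun p => edgeMatch fail p.2 && p.2.2.2 == "reverse" && decide (f0 < p.1))).map Prod.fst

theorem enum_cons (x : Int × Int × String) (t : List (Int × Int × String)) (k : Int) :
    PySem.List.enumerate (x :: t) k = (k, x) :: PySem.List.enumerate t (k + 1) := rfl

-- indices produced by enumerate l k lie in [k, k + l.length)
theorem mem_enum_bounds {l : List (Int × Int × String)} : ∀ {k : Int} {p : Int × (Int × Int × String)},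
    p ∈ PySem.List.enumerate l k → k ≤ p.1 ∧ p.1 < k + l.length := by
  induction l with
  | nil => intro k p h; simp [PySem.List.enumerate] at h
  | cons x t ih =>
    intro k p h
    rw [enum_cons, List.mem_cons] at h
    rcases h with h | h
    · subst h; refine ⟨le_refl _, ?_⟩; simp only [List.length_cons]; push_cast; omega
    · have := ih h
      simp only [List.length_cons]
      push_cast
      omega

theorem mem_filtmap_bounds {l : List (Int × Int × String)} {k i : Int}
    {q : Int × (Int × Int × String) → Bool}
    (h : i ∈ ((PySem.List.enumerate l k).filter q).map Prod.fst) : k ≤ i ∧ i < k + l.length := by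
  rcases List.mem_map.1 h with ⟨p, hp, rfl⟩
  exact mem_enum_bounds (List.mem_of_mem_filter hp)

theorem pairwise_filtmap {l : List (Int × Int × String)} {k : Int}
    {q : Int × (Int × Int × String) → Bool} :
    (((PySem.List.enumerate l k).filter q).map Prod.fst).Pairwise (· < ·) := by
  induction l generalizing k with
  | nil => simp [PySem.List.enumerate]
  | cons x t ih =>
    rw [enum_cons, List.filter_cons]
    by_cases hq : q (k, x)
    · rw [if_pos hq]
      simp only [List.map_cons, List.pairwise_cons]
      refine ⟨?_, ih⟩
      intro i hi
      have := (mem_filtmap_bounds hi).1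
      omega
    · rw [if_neg hq]; exact ih

-- last-of-cons with default
theorem getLast?_cons_getD (a d : Int) (xs : List Int) :
    ((a :: xs).getLast?.getD d) = xs.getLast?.getD a := by
  simp only [List.getLast?_cons, Option.getD_some]

-- Python max of a <-chain is its last element
theorem le_getLast_chain : ∀ (xs : List Int), xs.Pairwise (· < ·) → ∀ y ∈ xs, ∀ g, xs.getLast? = some g → y ≤ g := by
  intro xs
  induction xs with
  | nil => intro _ y hy; simp at hy
  | cons a t ih =>
    intro hp y hy g hg
    rw [List.pairwise_cons] at hp
    cases t with
    | nil => simp at hy hg; omega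
    | cons b t2 =>
      rw [List.getLast?_cons_cons] at hg
      rcases List.mem_cons.1 hy with rfl | hy'
      · exact le_of_lt (hp.1 g (List.mem_of_getLast? hg))
      · exact ih hp.2 y hy' g hg

-- Python max of a <-chain is its last element
theorem max?_chain (xs : List Int) (hx : xs.Pairwise (· < ·)) (hne : xs ≠ []) :
    PySem.List.max? xs id = xs.getLast? := by
  cases hm : PySem.List.max? xs id with
  | none => exact absurd ((PySem.List.max?_eq_none_iff xs id).1 hm) hne
  | some m =>
    cases hg : xs.getLast? with
    | none => rw [List.getLast?_eq_none_iff] at hg; exact absurd hg hne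
    | some g =>
      have h1 : m ≤ g := le_getLast_chain xs hx m (PySem.List.max?_mem hm) g hg
      have h2 : g ≤ m := PySem.List.max?_isMax hm g (List.mem_of_getLast? hg)
      simp [le_antisymm h1 h2]

-- the two Bool conditions (A's spelled-out one, B's tuple one) agree
theorem cond_eq (fail : Int × Int) (n1 n2 : Int) (lab s : String) :
    (((n1 == fail.1 && n2 == fail.2) || (n1 == fail.2 && n2 == fail.1)) && lab == s)
      = (edgeMatch fail (n1, n2, lab) && lab == s) := by
  obtain ⟨a, b⟩ := fail
  have h1 : (((n1, n2) : Int × Int) == (a, b)) = (n1 == a && n2 == b) := by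
    rw [Bool.eq_iff_iff]; simp [beq_iff_eq, Prod.ext_iff]
  have h2 : (((n2, n1) : Int × Int) == (a, b)) = (n1 == b && n2 == a) := by
    rw [Bool.eq_iff_iff]; simp [beq_iff_eq, Prod.ext_iff, and_comm]
  simp only [edgeMatch, h1, h2]

-- a "forward" hit and a "reverse" hit are mutually exclusive
theorem not_both' (fail : Int × Int) (x : Int × Int × String)
    (hF : (edgeMatch fail x && x.2.2 == "forward") = true) :
    (edgeMatch fail x && x.2.2 == "reverse") = false := by
  simp only [Bool.and_eq_true, beq_iff_eq] at hF
  simp [hF.2]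

theorem not_both (fail : Int × Int) (x : Int × Int × String)
    (hR : (edgeMatch fail x && x.2.2 == "reverse") = true) :
    (edgeMatch fail x && x.2.2 == "forward") = false := by
  simp only [Bool.and_eq_true, beq_iff_eq] at hR
  simp [hR.2]

-- characterisation of A's scan once search_mode is on (failed_edge = fail, start_idx = s0)
theorem scanT (fail : Int × Int) (l : List (Int × Int × String)) : ∀ (k s0 : Int),
    scanA fail l k s0 (-1) true fail =
      (match Ri fail l k with
       | [] => ((Fi fail l k).getLast?.getD s0, -1)
       | r :: _ => (((Fi fail l k).filter (fun i => decide (i < r))).getLast?.getD s0, r)) := by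
  induction l with
  | nil => intro k s0; simp [scanA, Ri, Fi, PySem.List.enumerate]
  | cons x t ih =>
    intro k s0
    obtain ⟨n1, n2, lab⟩ := x
    simp only [scanA, ite_self, Bool.true_and]
    rw [cond_eq fail n1 n2 lab "reverse", cond_eq fail n1 n2 lab "forward"]
    by_cases hR : (edgeMatch fail (n1, n2, lab) && lab == "reverse") = true
    · have hF := not_both fail (n1, n2, lab) hR
      rw [if_pos hR, if_neg (show ¬ (edgeMatch fail (n1, n2, lab) && lab == "forward") = true by simp [hF])]
      have hRi : Ri fail ((n1, n2, lab) :: t) k = k :: Ri fail t (k + 1) := by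
        simp only [Ri, enum_cons, List.filter_cons]
        rw [if_pos (by simpa using hR)]
        rfl
      have hFi : Fi fail ((n1, n2, lab) :: t) k = Fi fail t (k + 1) := by
        simp only [Fi, enum_cons, List.filter_cons]
        rw [if_neg (by simpa using hF)]
      rw [hRi, hFi]
      have hnil : (Fi fail t (k + 1)).filter (fun i => decide (i < k)) = [] := by
        rw [List.filter_eq_nil_iff]
        intro i hi
        have := (mem_filtmap_bounds hi).1
        simp only [decide_eq_true_eq]
        omega
      simp only [hnil]
      rfl
    · rw [if_neg hR]
      have hRi : Ri fail ((n1, n2, lab) :: t) k = Ri fail t (k + 1) := by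
        simp only [Ri, enum_cons, List.filter_cons]
        rw [if_neg (by simpa using hR)]
      by_cases hFb : (edgeMatch fail (n1, n2, lab) && lab == "forward") = true
      · rw [if_pos hFb, ih (k + 1) k, hRi]
        have hFi : Fi fail ((n1, n2, lab) :: t) k = k :: Fi fail t (k + 1) := by
          simp only [Fi, enum_cons, List.filter_cons]
          rw [if_pos (by simpa using hFb)]
          rfl
        rw [hFi]
        cases hri : Ri fail t (k + 1) with
        | nil =>
          simp only [getLast?_cons_getD]
        | cons r rest =>
          have hkr : k < r := by
            have : r ∈ Ri fail t (k + 1) := by rw [hri]; exact List.mem_cons_self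
            have := (mem_filtmap_bounds this).1
            omega
          simp only [List.filter_cons, decide_eq_true_eq, if_pos hkr, getLast?_cons_getD]
      · rw [if_neg hFb, ih (k + 1) s0, hRi]
        have hFi : Fi fail ((n1, n2, lab) :: t) k = Fi fail t (k + 1) := by
          simp only [Fi, enum_cons, List.filter_cons]
          rw [if_neg (by simpa using hFb)]
        rw [hFi]

-- characterisation of A's scan from its initial state
theorem scanF (fail : Int × Int) (l : List (Int × Int × String)) : ∀ (k : Int),
    scanA fail l k (-1) (-1) false (-1, -1) =
      (match Fi fail l k with
       | [] => ((-1 : Int), (-1 : Int))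
       | f0 :: _ =>
         match Ra fail l k f0 with
         | [] => ((Fi fail l k).getLast?.getD (-1), -1)
         | r :: _ => (((Fi fail l k).filter (fun i => decide (i < r))).getLast?.getD (-1), r)) := by
  induction l with
  | nil => intro k; simp [scanA, Fi, PySem.List.enumerate]
  | cons x t ih =>
    intro k
    obtain ⟨n1, n2, lab⟩ := x
    simp only [scanA]
    rw [cond_eq fail n1 n2 lab "forward"]
    by_cases hFb : (edgeMatch fail (n1, n2, lab) && lab == "forward") = true
    · simp only [hFb, if_true, Bool.true_and]
      rw [cond_eq fail n1 n2 lab "reverse"]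
      rw [if_neg (show ¬ (edgeMatch fail (n1, n2, lab) && lab == "reverse") = true by
        simp [not_both' fail (n1, n2, lab) hFb])]
      rw [scanT fail t (k + 1) k]
      have hFi : Fi fail ((n1, n2, lab) :: t) k = k :: Fi fail t (k + 1) := by
        simp only [Fi, enum_cons, List.filter_cons]
        rw [if_pos (by simpa using hFb)]
        rfl
      simp only [hFi]
      have hRa : Ra fail ((n1, n2, lab) :: t) k k = Ri fail t (k + 1) := by
        simp only [Ra, Ri, enum_cons, List.filter_cons]
        rw [if_neg (by simp)]
        congr 1
        apply List.filter_congr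
        intro p hp
        have hb := (mem_enum_bounds hp).1
        simp [show k < p.1 by omega]
      simp only [hRa]
      cases hri : Ri fail t (k + 1) with
      | nil =>
        simp only [getLast?_cons_getD]
      | cons r rest =>
        have hkr : k < r := by
          have : r ∈ Ri fail t (k + 1) := by rw [hri]; exact List.mem_cons_self
          have := (mem_filtmap_bounds this).1
          omega
        simp only [List.filter_cons, decide_eq_true_eq, if_pos hkr, getLast?_cons_getD]
    · have hF' : (edgeMatch fail (n1, n2, lab) && lab == "forward") = false := by
        simpa using hFb
      simp only [hF', Bool.false_eq_true, if_false, Bool.false_and]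
      rw [ih (k + 1)]
      have hFi : Fi fail ((n1, n2, lab) :: t) k = Fi fail t (k + 1) := by
        simp only [Fi, enum_cons, List.filter_cons]
        rw [if_neg (by simpa using hFb)]
      rw [hFi]
      cases hfi : Fi fail t (k + 1) with
      | nil => rfl
      | cons f0 rest =>
        have hf0 : k + 1 ≤ f0 := by
          have : f0 ∈ Fi fail t (k + 1) := by rw [hfi]; exact List.mem_cons_self
          exact (mem_filtmap_bounds this).1
        have hRa : Ra fail ((n1, n2, lab) :: t) k f0 = Ra fail t (k + 1) f0 := by
          simp only [Ra, enum_cons, List.filter_cons]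
          rw [if_neg (by simp; omega)]
        simp only [hRa]

-- one `del` at the top index of the prefix
theorem delA_append (pre tail : List (Int × Int × String)) (m : Nat) (h : pre.length = m + 1) :
    delA (pre ++ tail) (m : Int) = pre.take m ++ tail := by
  have hm : m < pre.length := by omega
  have hm2 : m < (pre ++ tail).length := by simp [List.length_append]; omega
  unfold delA PySem.List.pop? PySem.List.pyIdx?
  rw [if_pos (by positivity)]
  rw [if_pos (by exact_mod_cast hm2)]
  simp only [Int.toNat_natCast, Option.bind_some]
  obtain ⟨v, hv⟩ : ∃ v, (pre ++ tail)[m]? = some v := by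
    rw [List.getElem?_eq_getElem hm2]; exact ⟨_, rfl⟩
  simp only [hv, Option.map_some, Option.getD_some]
  rw [List.eraseIdx_append_of_lt_length hm]
  rw [List.eraseIdx_eq_take_drop_succ]
  have hd : pre.drop (m + 1) = [] := by rw [List.drop_eq_nil_iff]; omega
  simp [hd]

-- A's descending deletion loop removes the whole block
theorem delChain : ∀ (n : Nat) (sN : Nat) (pre tail : List (Int × Int × String)),
    pre.length = sN + n + 1 →
    ((List.range (n + 1)).map (fun j : Nat => ((sN + n : Nat) : Int) - (j : Int))).foldl delA (pre ++ tail)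
      = pre.take sN ++ tail := by
  intro n
  induction n with
  | zero =>
    intro sN pre tail h
    simp only [List.range_succ, List.range_zero, List.nil_append, List.map_cons, List.map_nil,
      List.foldl_cons, List.foldl_nil]
    have : ((sN + 0 : Nat) : Int) - (0 : Nat) = (sN : Int) := by push_cast; ring
    rw [this, delA_append pre tail sN (by omega)]
  | succ n ih =>
    intro sN pre tail h
    rw [List.range_succ_eq_map, List.map_cons, List.foldl_cons, List.map_map]
    have h0 : ((sN + (n + 1) : Nat) : Int) - ((0 : Nat) : Int) = ((sN + n + 1 : Nat) : Int) := by
      push_cast; ring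
    rw [h0, delA_append pre tail (sN + n + 1) (by omega)]
    have hmap : ((List.range (n + 1)).map ((fun j : Nat => ((sN + (n + 1) : Nat) : Int) - (j : Int)) ∘ (fun i => i + 1)))
        = (List.range (n + 1)).map (fun j : Nat => ((sN + n : Nat) : Int) - (j : Int)) := by
      apply List.map_congr_left
      intro j _
      simp only [Function.comp_apply]
      push_cast; ring
    rw [hmap]
    have := ih sN (pre.take (sN + n + 1)) tail (by rw [List.length_take]; omega)
    rw [this, List.take_take]
    have hmin : min sN (sN + n + 1) = sN := by omega
    rw [hmin]

theorem pyRange_neg_one (a b : Int) :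
    PySem.List.pyRange a b (-1) = (List.range (a - b).toNat).map (fun j : Nat => a - (j : Int)) := by
  rw [PySem.List.pyRange]
  rw [if_neg (by norm_num : ¬ (-1 : Int) = 0)]
  rw [if_neg (by norm_num : ¬ (0 : Int) < -1)]
  by_cases h : b < a
  · rw [if_pos h]
    have : (a - b + - -1 - 1) / - -1 = a - b := by norm_num
    rw [this]
    apply List.map_congr_left
    intro k _
    ring
  · rw [if_neg h]
    have : (a - b).toNat = 0 := by omega
    simp [this]

-- the per-fail steps agree
theorem step_eq (dfs : List (Int × Int × String)) (fail : Int × Int) :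
    stepA dfs fail = stepB dfs fail := by
  unfold stepA stepB
  rw [scanF fail dfs 0]
  rw [show ((PySem.List.enumerate dfs 0).filter (fun p => edgeMatch fail p.2 && p.2.2.2 == "forward")).map Prod.fst = Fi fail dfs 0 from rfl]
  cases hF : Fi fail dfs 0 with
  | nil =>
    simp
  | cons f0 ft =>
    dsimp only
    rw [show ((PySem.List.enumerate dfs 0).filter
        (fun p => edgeMatch fail p.2 && p.2.2.2 == "reverse" && decide (f0 < p.1))).map Prod.fst
        = Ra fail dfs 0 f0 from rfl]
    cases hra : Ra fail dfs 0 f0 with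
    | nil =>
      simp
    | cons r rt =>
      dsimp only
      rw [← hF]
      have hrmem : r ∈ Ra fail dfs 0 f0 := by rw [hra]; exact List.mem_cons_self
      have hrb : (0 : Int) ≤ r ∧ r < (0 : Int) + dfs.length := mem_filtmap_bounds hrmem
      have hf0r : f0 < r := by
        rcases List.mem_map.1 hrmem with ⟨p, hp, rfl⟩
        have := (List.mem_filter.1 hp).2
        simp only [Bool.and_eq_true, decide_eq_true_eq] at this
        exact this.2
      have hf0mem : f0 ∈ Fi fail dfs 0 := by rw [hF]; exact List.mem_cons_self
      have hfiltmem : f0 ∈ (Fi fail dfs 0).filter (fun i => decide (i < r)) :=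
        List.mem_filter.2 ⟨hf0mem, by simpa using hf0r⟩
      have hfiltne : (Fi fail dfs 0).filter (fun i => decide (i < r)) ≠ [] :=
        List.ne_nil_of_mem hfiltmem
      obtain ⟨S, hS⟩ : ∃ S, ((Fi fail dfs 0).filter (fun i => decide (i < r))).getLast? = some S := by
        cases hq : ((Fi fail dfs 0).filter (fun i => decide (i < r))).getLast? with
        | none => rw [List.getLast?_eq_none_iff] at hq; exact absurd hq hfiltne
        | some S => exact ⟨S, rfl⟩
      have hSmem : S ∈ (Fi fail dfs 0).filter (fun i => decide (i < r)) := List.mem_of_getLast? hS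
      have hSFi : S ∈ Fi fail dfs 0 := List.mem_of_mem_filter hSmem
      have hSb : (0 : Int) ≤ S ∧ S < (0 : Int) + dfs.length := mem_filtmap_bounds hSFi
      have hSr : S < r := by
        have := (List.mem_filter.1 hSmem).2
        simpa using this
      simp only [hS, Option.getD_some]
      rw [if_pos (by constructor <;> omega)]
      -- B side: max of the filtered forward indices is S
      have hpw : ((Fi fail dfs 0).filter (fun i => decide (i < r))).Pairwise (· < ·) :=
        List.Pairwise.filter _ pairwise_filtmap
      rw [max?_chain _ hpw hfiltne, hS]
      simp only [Option.getD_some]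
      -- slices
      rw [PySem.List.slice_to dfs hSb.1, PySem.List.slice_from dfs (by omega : (0:Int) ≤ r + 1)]
      -- A side: the deletion loop
      rw [pyRange_neg_one r (S - 1)]
      have hn : (r - (S - 1)).toNat = (r.toNat - S.toNat) + 1 := by omega
      rw [hn]
      have hfun : (fun j : Nat => r - (j : Int))
          = (fun j : Nat => ((S.toNat + (r.toNat - S.toNat) : Nat) : Int) - (j : Int)) := by
        funext j
        have : ((S.toNat + (r.toNat - S.toNat) : Nat) : Int) = r := by omega
        rw [this]
      rw [hfun]
      have hsplit : dfs = dfs.take (r.toNat + 1) ++ dfs.drop (r.toNat + 1) :=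
        (List.take_append_drop _ _).symm
      rw [show ((r : Int) + 1).toNat = r.toNat + 1 by omega] at *
      conv_lhs => rw [hsplit]
      rw [delChain (r.toNat - S.toNat) S.toNat (dfs.take (r.toNat + 1)) (dfs.drop (r.toNat + 1))
        (by rw [List.length_take]; omega)]
      rw [List.take_take]
      have hmin : min S.toNat (r.toNat + 1) = S.toNat := by omega
      rw [hmin]

-- ===== VERDICT (by name: the statement is the Claim_ definition above) =====
theorem fold_eq : ∀ (fails : List (Int × Int)) (dfs : List (Int × Int × String)),
    fails.foldl stepA dfs = fails.foldl stepB dfs := by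
  intro fails
  induction fails with
  | nil => intro dfs; rfl
  | cons f fs ih => intro dfs; simp only [List.foldl_cons, step_eq]; exact ih _

theorem removeFails_spec : Claim_equal_removeFails := by
  intro dfs fails _
  unfold Spec_removeFails removeFails removeFails_alt
  exact fold_eq fails dfs
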